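-- pv_equiv track=rewrite | github.com/ChintanDave3216/veltrion-openenv | server/data_generator.py | generate_error_report
-- ===== SOURCE A (Python) =====
-- def generate_error_report(dirty_data: list[dict], error_manifest: list[dict]) -> str:
--     """Generate a human-readable error report for the agent."""
--     lines = [f"=== DATA QUALITY REPORT ==="]
--     lines.append(f"Total rows: {len(dirty_data)}")
--     lines.append(f"Total issues detected: {len(error_manifest)}")
--     lines.append("")
--
--     # Group errors by type
--     error_types = {}
--     for err in error_manifest:
--         et = err["error_type"]
--         if et not in error_types:
--             error_types[et] = []
--         error_types[et].append(err)
--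
--     for et, errors in error_types.items():
--         lines.append(f"  [{et.upper()}] - {len(errors)} issue(s)")
--         for err in errors:
--             if err["error_type"] == "duplicate_row":
--                 lines.append(f"    Row {err['row']}: Duplicate row ({err['dirty_value']})")
--             elif err["error_type"] == "missing_value":
--                 lines.append(f"    Row {err['row']}, Column '{err['col']}': Empty/missing value")
--             elif err["error_type"] == "cross_column":
--                 lines.append(f"    Row {err['row']}, Column '{err['col']}': Value doesn't match related column")
--             elif err["error_type"] in ("negative_value", "future_date"):
--                 lines.append(f"    Row {err['row']}, Column '{err['col']}': Logically invalid value '{err['dirty_value']}'")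
--             else:
--                 lines.append(f"    Row {err['row']}, Column '{err['col']}': Current='{err['dirty_value']}'")
--
--     return "\n".join(lines)
-- ===== SOURCE B (Python) =====
-- def _format_error(err):
--     if err["error_type"] == "duplicate_row":
--         return f"    Row {err['row']}: Duplicate row ({err['dirty_value']})"
--     elif err["error_type"] == "missing_value":
--         return f"    Row {err['row']}, Column '{err['col']}': Empty/missing value"
--     elif err["error_type"] == "cross_column":
--         return f"    Row {err['row']}, Column '{err['col']}': Value doesn't match related column"
--     elif err["error_type"] in ("negative_value", "future_date"):
--         return f"    Row {err['row']}, Column '{err['col']}': Logically invalid value '{err['dirty_value']}'"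
--     else:
--         return f"    Row {err['row']}, Column '{err['col']}': Current='{err['dirty_value']}'"
--
--
-- def generate_error_report(dirty_data: list[dict], error_manifest: list[dict]) -> str:
--     """Generate a human-readable error report for the agent."""
--     lines = [
--         "=== DATA QUALITY REPORT ===",
--         f"Total rows: {len(dirty_data)}",
--         f"Total issues detected: {len(error_manifest)}",
--         "",
--     ]
--     ordered = list(dict.fromkeys(e["error_type"] for e in error_manifest))
--     for et in ordered:
--         errors = [e for e in error_manifest if e["error_type"] == et]
--         lines.append(f"  [{et.upper()}] - {len(errors)} issue(s)")
--         for err in errors: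
--             lines.append(_format_error(err))
--     return "\n".join(lines)
-- ===== Notes on version B (the rewrite author's own statement) =====
-- stated objective: alternative
-- what changed: Replaces A's single-pass mutable dict that groups errors by type with a two-phase plan: first the distinct error types in first-appearance order (dict.fromkeys), then one filtering scan of the manifest per type, with the per-error formatting factored into a helper.
import Mathlib
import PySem

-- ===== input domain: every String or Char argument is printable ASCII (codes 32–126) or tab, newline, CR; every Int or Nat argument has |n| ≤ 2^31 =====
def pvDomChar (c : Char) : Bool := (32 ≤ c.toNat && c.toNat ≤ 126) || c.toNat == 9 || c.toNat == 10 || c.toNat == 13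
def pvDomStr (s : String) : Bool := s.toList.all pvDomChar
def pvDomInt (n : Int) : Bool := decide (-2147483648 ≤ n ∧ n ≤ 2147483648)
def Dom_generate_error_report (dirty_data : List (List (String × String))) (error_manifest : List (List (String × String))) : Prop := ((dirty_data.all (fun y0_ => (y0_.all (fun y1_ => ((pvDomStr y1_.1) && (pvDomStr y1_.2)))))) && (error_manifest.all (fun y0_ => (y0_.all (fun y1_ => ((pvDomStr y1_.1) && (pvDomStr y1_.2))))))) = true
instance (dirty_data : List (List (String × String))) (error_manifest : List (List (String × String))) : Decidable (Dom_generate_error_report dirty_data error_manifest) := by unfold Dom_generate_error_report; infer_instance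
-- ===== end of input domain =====

-- B builds the report from the distinct error types (first-appearance order) by filtering the
-- manifest once per type, instead of A's single-pass grouping dict; same output (alternative
-- decomposition, no speed claim). Equivalence of the RETURN value is what is proved.

-- err[k] on the assoc-list dict (first match; "" never read under Pre_, where the key is present)
def pvGetKey (err : List (String × String)) (k : String) : String :=
  (PySem.Dict.mk err).getD k ""

-- the if/elif formatting chain, identical source text in A and in Source B's _format_error helper
def pvFormatError (err : List (String × String)) : String :=
  let et := pvGetKey err "error_type"
  if et == "duplicate_row" then
    "    Row " ++ pvGetKey err "row" ++ ": Duplicate row (" ++ pvGetKey err "dirty_value" ++ ")"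
  else if et == "missing_value" then
    "    Row " ++ pvGetKey err "row" ++ ", Column '" ++ pvGetKey err "col" ++ "': Empty/missing value"
  else if et == "cross_column" then
    "    Row " ++ pvGetKey err "row" ++ ", Column '" ++ pvGetKey err "col" ++ "': Value doesn't match related column"
  else if et == "negative_value" || et == "future_date" then
    "    Row " ++ pvGetKey err "row" ++ ", Column '" ++ pvGetKey err "col" ++ "': Logically invalid value '" ++ pvGetKey err "dirty_value" ++ "'"
  else
    "    Row " ++ pvGetKey err "row" ++ ", Column '" ++ pvGetKey err "col" ++ "': Current='" ++ pvGetKey err "dirty_value" ++ "'"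

def pvHeader (dirty_data : List (List (String × String))) (error_manifest : List (List (String × String))) : List String :=
  ["=== DATA QUALITY REPORT ===",
   "Total rows: " ++ PySem.Int.toStr (dirty_data.length : Int),
   "Total issues detected: " ++ PySem.Int.toStr (error_manifest.length : Int),
   ""]

-- ===== PORT A =====
def generate_error_report (dirty_data : List (List (String × String))) (error_manifest : List (List (String × String))) : String :=
  let lines := pvHeader dirty_data error_manifest
  -- for err in error_manifest: if et not in error_types: error_types[et] = []; error_types[et].append(err)
  let error_types : PySem.Dict String (List (List (String × String))) :=
    error_manifest.foldl (fun d err =>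
      let et := pvGetKey err "error_type"
      let d := if d.contains et then d else d.insert et []
      PySem.Dict.modify d et [] (fun l => l ++ [err])) PySem.Dict.empty
  -- for et, errors in error_types.items(): …
  let lines := error_types.items.foldl (fun ls p =>
      let ls := ls ++ ["  [" ++ PySem.Str.upper p.1 ++ "] - " ++ PySem.Int.toStr (p.2.length : Int) ++ " issue(s)"]
      p.2.foldl (fun ls err => ls ++ [pvFormatError err]) ls) lines
  PySem.Str.join "\n" lines

-- ===== PORT B =====
def generate_error_report_alt (dirty_data : List (List (String × String))) (error_manifest : List (List (String × String))) : String :=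
  let lines := pvHeader dirty_data error_manifest
  let ordered := PySem.List.dedup (error_manifest.map (fun e => pvGetKey e "error_type"))
  let lines := ordered.foldl (fun ls et =>
      let errors := error_manifest.filter (fun e => pvGetKey e "error_type" == et)
      let ls := ls ++ ["  [" ++ PySem.Str.upper et ++ "] - " ++ PySem.Int.toStr (errors.length : Int) ++ " issue(s)"]
      errors.foldl (fun ls err => ls ++ [pvFormatError err]) ls) lines
  PySem.Str.join "\n" lines

-- ===== PRECONDITION & SPEC =====
-- Pre_ excludes exactly the manifests on which Python A raises KeyError: an entry missing
-- "error_type", "row", or the per-branch keys ("col"/"dirty_value") its formatting line reads.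
def Pre_generate_error_report (dirty_data : List (List (String × String))) (error_manifest : List (List (String × String))) : Prop :=
  ∀ e ∈ error_manifest,
    "error_type" ∈ e.map (·.1) ∧ "row" ∈ e.map (·.1) ∧
    (let et := pvGetKey e "error_type"
     if et = "duplicate_row" then "dirty_value" ∈ e.map (·.1)
     else if et = "missing_value" ∨ et = "cross_column" then "col" ∈ e.map (·.1)
     else "col" ∈ e.map (·.1) ∧ "dirty_value" ∈ e.map (·.1))
instance (dirty_data : List (List (String × String))) (error_manifest : List (List (String × String))) : Decidable (Pre_generate_error_report dirty_data error_manifest) := by unfold Pre_generate_error_report; infer_instance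

def pvWitness_generate_error_report : (List (List (String × String))) × (List (List (String × String))) :=
  ([[("id", "1")]],
   [[("error_type", "missing_value"), ("row", "0"), ("col", "age")],
    [("error_type", "duplicate_row"), ("row", "1"), ("dirty_value", "x")]])

def Spec_generate_error_report (dirty_data : List (List (String × String))) (error_manifest : List (List (String × String))) (out : String) : Prop := out = generate_error_report_alt dirty_data error_manifest
instance (dirty_data : List (List (String × String))) (error_manifest : List (List (String × String))) (out : String) : Decidable (Spec_generate_error_report dirty_data error_manifest out) := by unfold Spec_generate_error_report; infer_instance

-- ===== CLAIM (what is proved, stated in full; the proofs are below) =====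
def Claim_equal_generate_error_report : Prop := ∀ (dirty_data : List (List (String × String))) (error_manifest : List (List (String × String))), Dom_generate_error_report dirty_data error_manifest → Pre_generate_error_report dirty_data error_manifest → Spec_generate_error_report dirty_data error_manifest (generate_error_report dirty_data error_manifest)

-- ===== LEMMAS AND PROOFS =====

-- A's loop body (conditional-insert then append) is the modify-grouping step
lemma pv_stepA_eq_modify (d : PySem.Dict String (List (List (String × String)))) (err : List (String × String)) :
    (let et := pvGetKey err "error_type"
     let d := if d.contains et then d else d.insert et []
     PySem.Dict.modify d et [] (fun l => l ++ [err]))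
    = PySem.Dict.modify d (pvGetKey err "error_type") [] (fun l => l ++ [err]) := by
  by_cases h : d.contains (pvGetKey err "error_type")
  · simp [h]
  · have h' : d.contains (pvGetKey err "error_type") = false := by simpa using h
    simp [h, PySem.Dict.modify, PySem.Dict.getD_insert_self,
      PySem.Dict.insert_insert_self, PySem.Dict.getD_of_not_contains _ _ h']

-- A's grouping dict has exactly B's items: distinct types in first-appearance order,
-- each paired with the filter of the manifest by that type
lemma pv_items_eq (em : List (List (String × String))) :
    (em.foldl (fun d err =>
      let et := pvGetKey err "error_type"
      let d := if d.contains et then d else d.insert et []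
      PySem.Dict.modify d et [] (fun l => l ++ [err])) PySem.Dict.empty).items
    = (PySem.List.dedup (em.map (fun e => pvGetKey e "error_type"))).map
        (fun et => (et, em.filter (fun e => pvGetKey e "error_type" == et))) := by
  have hstep : (em.foldl (fun d err =>
      let et := pvGetKey err "error_type"
      let d := if d.contains et then d else d.insert et []
      PySem.Dict.modify d et [] (fun l => l ++ [err])) PySem.Dict.empty)
      = (em.map (fun e => (pvGetKey e "error_type", e))).foldl
          (fun d p => PySem.Dict.modify d p.1 [] (fun l => l ++ [p.2])) PySem.Dict.empty := by
    rw [List.foldl_map]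
    exact PySem.List.foldl_congr_mem _ _ _ _ (fun d err _ => pv_stepA_eq_modify d err)
  rw [hstep]
  set D := (em.map (fun e => (pvGetKey e "error_type", e))).foldl
      (fun d p => PySem.Dict.modify d p.1 [] (fun l => l ++ [p.2])) PySem.Dict.empty with hD
  have hnodup : D.keys.Nodup := by
    rw [hD]
    exact PySem.Dict.nodup_keys_foldl_modify_key _ _ _ _ _ PySem.Dict.nodup_keys_empty
  have hkeys : D.keys = PySem.List.dedup (em.map (fun e => pvGetKey e "error_type")) := by
    rw [hD, PySem.Dict.keys_foldl_modify_key]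
    simp [PySem.Dict.keys_empty, PySem.List.dedup_eq_ofList, PySem.Set.update,
      PySem.Set.ofList_eq_foldl, List.map_map, Function.comp_def]
  have hget : ∀ et, D.getD et [] = em.filter (fun e => pvGetKey e "error_type" == et) := by
    intro et
    rw [hD, PySem.Dict.getD_foldl_modify_append]
    simp [PySem.Dict.getD_empty, List.filter_map, Function.comp_def]
  rw [PySem.Dict.items_eq_map_keys D hnodup [], hkeys]
  exact List.map_congr_left (fun et _ => by rw [hget et])

-- ===== VERDICT (by name: the statement is the Claim_ definition above) =====
theorem generate_error_report_spec : Claim_equal_generate_error_report := by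
  intro dd em _ _
  unfold Spec_generate_error_report
  simp only [generate_error_report, generate_error_report_alt, pv_items_eq, List.foldl_map]
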